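-- pv_equiv track=rewrite | github.com/intel/intel-sgx-ssl | Linux/1.1.1d-patch/nasm-lfence.py | get_src_index
-- ===== SOURCE A (Python) =====
-- def get_src_index(options):
--     src_index = -1
--     for i in range(0,len(options)):
--         if options[i].endswith('.asm'):
--             if(src_index != -1):
--                 print ('source files conflict')
--                 exit(-1)
--             src_index = i
--     if src_index == -1:
--         print ('cannot find the source file')
--         exit(-1)
--     return src_index
-- ===== SOURCE B (Python) =====
-- def get_src_index(options):
--     # bidirectional search: first '.asm' match scanning from the front, last
--     # '.asm' match scanning from the back; the source is unique iff they coincide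
--     n = len(options)
--     first = next((i for i in range(n) if options[i].endswith('.asm')), None)
--     if first is None:
--         print ('cannot find the source file')
--         exit(-1)
--     last = next(i for i in range(n - 1, -1, -1) if options[i].endswith('.asm'))
--     if first != last:
--         print ('source files conflict')
--         exit(-1)
--     return first
-- ===== Notes on version B (the rewrite author's own statement) =====
-- stated objective: alternative
-- what changed: Replaces A's single forward pass with a mutable accumulator and mid-loop conflict exit by two directional searches: the first '.asm' match scanning forward and the last '.asm' match scanning backward; the index is unique exactly when the two searches coincide.
import Mathlib
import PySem

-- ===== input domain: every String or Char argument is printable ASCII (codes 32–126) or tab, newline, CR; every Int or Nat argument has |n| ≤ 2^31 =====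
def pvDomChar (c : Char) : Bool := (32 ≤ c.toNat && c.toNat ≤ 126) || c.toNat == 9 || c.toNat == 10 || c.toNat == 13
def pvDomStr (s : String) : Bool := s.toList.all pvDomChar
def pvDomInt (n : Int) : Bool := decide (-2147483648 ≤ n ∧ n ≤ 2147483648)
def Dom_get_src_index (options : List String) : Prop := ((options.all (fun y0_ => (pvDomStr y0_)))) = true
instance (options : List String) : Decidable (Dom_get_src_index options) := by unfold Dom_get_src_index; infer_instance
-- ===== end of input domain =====

-- B replaces A's single forward pass with accumulator and mid-loop conflict exit by
-- two directional searches (first match from the front, last match from the back),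
-- returning the index iff they coincide; objective: alternative.


-- ===== PORT A =====
-- A's for-loop over range(0, len(options)) with accumulator src_index; the two
-- exit(-1) paths (conflict, no source) are modelled by `none` / the final check.
def getSrcIndexLoop (options : List String) (i : Nat) (src : Int) : Option Int :=
  if h : i < options.length then
    if PySem.Str.endswith options[i] ".asm" then
      if src ≠ -1 then none                           -- print + exit(-1): conflict
      else getSrcIndexLoop options (i+1) (Int.ofNat i)
    else getSrcIndexLoop options (i+1) src
  else some src
termination_by options.length - i

def get_src_index (options : List String) : Int :=
  match getSrcIndexLoop options 0 (-1) with
  | none => -1                                        -- exit(-1) (conflict)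
  | some s => if s = -1 then -1 else s                -- exit(-1) when no source file

-- ===== PORT B =====
-- forward generator: first index ≥ i whose option ends in '.asm'
def findFwd : List String → Nat → Option Nat
  | [], _ => none
  | o :: rest, i => if PySem.Str.endswith o ".asm" then some i else findFwd rest (i+1)

-- is options[k] an '.asm' option (false out of range)
def asmAt (options : List String) (k : Nat) : Bool :=
  match options[k]? with
  | some o => PySem.Str.endswith o ".asm"
  | none => false

-- backward generator over range(n-1, -1, -1), starting at index i and counting down
def findBwd (options : List String) : Nat → Option Nat
  | 0 => if asmAt options 0 then some 0 else none
  | i + 1 => if asmAt options (i + 1) then some (i + 1) else findBwd options i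

def get_src_index_alt (options : List String) : Int :=
  match findFwd options 0 with
  | none => -1                                        -- exit(-1) (no source file)
  | some first =>
    match findBwd options (options.length - 1) with
    | none => -1                                      -- unreachable: a match exists
    | some last => if first ≠ last then -1 else Int.ofNat first  -- conflict / unique

-- ===== PRECONDITION & SPEC =====
-- Pre_ excludes exactly the inputs on which the Python A raises SystemExit
-- (zero '.asm' options or more than one); A returns no value there.
def Pre_get_src_index (options : List String) : Prop :=
  (options.filter (fun o => PySem.Str.endswith o ".asm")).length = 1
instance (options : List String) : Decidable (Pre_get_src_index options) := by
  unfold Pre_get_src_index; infer_instance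

def pvWitness_get_src_index : List String := (["main.asm", "out.o"])

def Spec_get_src_index (options : List String) (out : Int) : Prop := out = get_src_index_alt options
instance (options : List String) (out : Int) : Decidable (Spec_get_src_index options out) := by unfold Spec_get_src_index; infer_instance

-- ===== CLAIM (what is proved, stated in full; the proofs are below) =====
def Claim_equal_get_src_index : Prop := ∀ (options : List String), Dom_get_src_index options → Pre_get_src_index options → Spec_get_src_index options (get_src_index options)

-- ===== LEMMAS AND PROOFS =====

-- indices (from offset i) of the options ending in '.asm'
def hitsN : List String → Nat → List Nat
  | [], _ => []
  | o :: rest, i =>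
    if PySem.Str.endswith o ".asm" then i :: hitsN rest (i+1) else hitsN rest (i+1)

theorem hitsN_length (xs : List String) (i : Nat) :
    (hitsN xs i).length = (xs.filter (fun o => PySem.Str.endswith o ".asm")).length := by
  induction xs generalizing i with
  | nil => simp [hitsN]
  | cons x xs ih =>
      simp only [hitsN, List.filter_cons]
      split <;> simp [ih]

theorem mem_hitsN (xs : List String) (i k : Nat) :
    k ∈ hitsN xs i ↔ ∃ m, ∃ h : m < xs.length,
      PySem.Str.endswith xs[m] ".asm" = true ∧ k = i + m := by
  induction xs generalizing i with
  | nil => simp [hitsN]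
  | cons x xs ih =>
      simp only [hitsN]
      constructor
      · intro hk
        split at hk
        · rcases List.mem_cons.mp hk with rfl | h
          · exact ⟨0, by simp, by simpa, by omega⟩
          · obtain ⟨m, hm, hp, hkm⟩ := (ih (i+1)).mp h
            exact ⟨m+1, by simpa using hm, by simpa using hp, by omega⟩
        · obtain ⟨m, hm, hp, hkm⟩ := (ih (i+1)).mp hk
          exact ⟨m+1, by simpa using hm, by simpa using hp, by omega⟩
      · rintro ⟨m, hm, hp, rfl⟩
        cases m with
        | zero =>
            simp only [List.getElem_cons_zero] at hp
            rw [if_pos hp]; simp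
        | succ m =>
            have hmem : (i + (m+1)) ∈ hitsN xs (i+1) :=
              (ih (i+1)).mpr ⟨m, by simpa using hm, by simpa using hp, by omega⟩
            split
            · exact List.mem_cons_of_mem _ hmem
            · exact hmem

-- abstract form of A's loop over the list of remaining hit indices
def hitsRun : List Nat → Int → Option Int
  | [], src => some src
  | j :: rest, src => if src ≠ -1 then none else hitsRun rest (Int.ofNat j)

theorem getSrcIndexLoop_eq_hitsRun (options : List String) :
    ∀ n i src, options.length - i = n →
      getSrcIndexLoop options i src = hitsRun (hitsN (options.drop i) i) src := by
  intro n
  induction n with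
  | zero =>
      intro i src hn
      have h : ¬ i < options.length := by omega
      rw [getSrcIndexLoop, dif_neg h]
      rw [List.drop_eq_nil_of_le (by omega)]
      simp [hitsN, hitsRun]
  | succ n ih =>
      intro i src hn
      have h : i < options.length := by omega
      have hdrop : options.drop i = options[i] :: options.drop (i+1) :=
        (List.getElem_cons_drop h).symm
      rw [getSrcIndexLoop, dif_pos h, hdrop]
      simp only [hitsN]
      by_cases he : PySem.Str.endswith options[i] ".asm" = true
      · rw [if_pos he, if_pos he]
        simp only [hitsRun]
        by_cases hs : src = -1
        · rw [if_neg (by simp [hs]), if_neg (by simp [hs])]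
          exact ih (i+1) (Int.ofNat i) (by omega)
        · rw [if_pos (by simp [hs]), if_pos (by simp [hs])]
      · rw [if_neg he, if_neg he]
        exact ih (i+1) src (by omega)

-- B's forward search returns the head of the hit list
theorem findFwd_eq_head (xs : List String) (i : Nat) :
    findFwd xs i = (hitsN xs i).head? := by
  induction xs generalizing i with
  | nil => simp [findFwd, hitsN]
  | cons x xs ih =>
      simp only [findFwd, hitsN]
      split <;> simp [ih]

-- B's backward search finds j when j is a hit ≤ i and no hit lies strictly above j up to i
theorem findBwd_finds (options : List String) (j : Nat)
    (hj : asmAt options j = true) :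
    ∀ i, j ≤ i → (∀ k, j < k → k ≤ i → asmAt options k = false) →
      findBwd options i = some j := by
  intro i
  induction i with
  | zero =>
      intro hji _
      have : j = 0 := by omega
      subst this
      simp [findBwd, hj]
  | succ i ih =>
      intro hji hno
      by_cases hji' : j = i + 1
      · subst hji'
        simp [findBwd, hj]
      · have hfalse : asmAt options (i+1) = false := hno (i+1) (by omega) (by omega)
        rw [findBwd, hfalse]
        simp only [Bool.false_eq_true, if_false]
        exact ih (by omega) (fun k hk1 hk2 => hno k hk1 (by omega))

theorem asmAt_iff_mem (options : List String) (k : Nat) :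
    asmAt options k = true ↔ k ∈ hitsN options 0 := by
  rw [mem_hitsN]
  unfold asmAt
  constructor
  · intro h
    cases hg : options[k]? with
    | none => rw [hg] at h; simp at h
    | some o =>
        rw [hg] at h
        have hk : k < options.length := by
          by_contra hk
          rw [List.getElem?_eq_none (by omega)] at hg
          simp at hg
        refine ⟨k, hk, ?_, by omega⟩
        have : options[k] = o := by
          have := List.getElem?_eq_getElem hk
          rw [hg] at this; exact (Option.some.injEq _ _).mp this.symm
        rw [this]; exact h
  · rintro ⟨m, hm, hp, rfl⟩
    simp only [Nat.zero_add]
    rw [List.getElem?_eq_getElem hm]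
    exact hp

theorem ports_agree (options : List String)
    (hpre : (options.filter (fun o => PySem.Str.endswith o ".asm")).length = 1) :
    get_src_index options = get_src_index_alt options := by
  have hlen : (hitsN options 0).length = 1 := by rw [hitsN_length]; exact hpre
  obtain ⟨j, hj⟩ : ∃ j, hitsN options 0 = [j] := by
    cases h : hitsN options 0 with
    | nil => rw [h] at hlen; simp at hlen
    | cons a t =>
        rw [h] at hlen; simp at hlen
        exact ⟨a, by rw [hlen]⟩
  have hjmem : j ∈ hitsN options 0 := by rw [hj]; simp
  have hjasm : asmAt options j = true := (asmAt_iff_mem options j).mpr hjmem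
  obtain ⟨m, hm, _, hjm⟩ := (mem_hitsN options 0 j).mp hjmem
  have hjlt : j < options.length := by omega
  -- A's value
  have hA : get_src_index options = Int.ofNat j := by
    unfold get_src_index
    rw [getSrcIndexLoop_eq_hitsRun options options.length 0 (-1) (by omega),
        List.drop_zero, hj]
    simp [hitsRun]
  -- B's value
  have huniq : ∀ k, asmAt options k = true → k = j := by
    intro k hk
    have := (asmAt_iff_mem options k).mp hk
    rw [hj] at this; simpa using this
  have hB : get_src_index_alt options = Int.ofNat j := by
    unfold get_src_index_alt
    rw [findFwd_eq_head, hj]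
    simp only [List.head?_cons]
    rw [findBwd_finds options j hjasm (options.length - 1) (by omega)
        (fun k hk1 _ => by
          by_contra hc
          have := huniq k (by simpa using hc)
          omega)]
    simp
  rw [hA, hB]

-- ===== VERDICT (by name: the statement is the Claim_ definition above) =====
theorem get_src_index_spec : Claim_equal_get_src_index := by
  intro options _ hpre
  unfold Spec_get_src_index
  exact ports_agree options hpre
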